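-- pv_equiv track=rewrite | github.com/jimmynguyen/advent-of-code | solutions/2015/day14.py | compute_max_score_2
-- ===== SOURCE A (Python) =====
-- def compute_max_score_2(distances,total_time):
--     scores = [0] * len(distances)
--     for i in range(total_time):
--         _distances = [d[i] for d in distances]
--         max_distance = max(_distances)
--         for i,d in enumerate(_distances):
--             scores[i] += 1 if d == max_distance else 0
--     return max(scores)
-- ===== SOURCE B (Python) =====
-- def compute_max_score_2(distances, total_time):
--     # Pairwise-dominance algorithm: no per-second maximum is ever computed.
--     # A reindeer earns a point at second t exactly when every reindeer's
--     # distance at t is <= its own (it is undominated at t).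
--     return max(
--         sum(1 for t in range(total_time)
--             if all(other[t] <= d[t] for other in distances))
--         for d in distances)
-- ===== Notes on version B (the rewrite author's own statement) =====
-- stated objective: alternative
-- what changed: B never computes a per-second maximum or a mutable scores list: each reindeer's score is counted directly as the seconds at which it is undominated (every other reindeer's distance <= its own), a pairwise-dominance test replacing A's max-then-compare passes.
import Mathlib
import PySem

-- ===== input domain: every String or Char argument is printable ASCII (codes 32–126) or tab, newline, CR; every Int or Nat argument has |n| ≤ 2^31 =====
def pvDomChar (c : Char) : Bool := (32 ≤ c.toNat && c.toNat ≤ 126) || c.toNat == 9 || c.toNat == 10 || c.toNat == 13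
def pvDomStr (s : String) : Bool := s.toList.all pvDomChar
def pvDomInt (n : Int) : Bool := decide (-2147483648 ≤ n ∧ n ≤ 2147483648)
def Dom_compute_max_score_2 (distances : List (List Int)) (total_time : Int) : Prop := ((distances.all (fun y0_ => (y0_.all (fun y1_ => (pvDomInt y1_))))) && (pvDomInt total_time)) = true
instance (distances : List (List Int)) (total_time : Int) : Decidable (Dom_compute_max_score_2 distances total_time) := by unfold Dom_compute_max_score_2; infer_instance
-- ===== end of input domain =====

-- B replaces A's per-second max-then-compare scoring of a mutable scores list by a
-- pairwise-dominance count per reindeer (no per-second maximum, no scores list).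

-- ===== PORT A =====
def compute_max_score_2 (distances : List (List Int)) (total_time : Int) : Int :=
  let scores0 : List Int := List.replicate distances.length 0
  let scores := (PySem.List.pyRange 0 total_time 1).foldl (fun scores i =>
    let ds := distances.map (fun d => (PySem.List.pyGet? d i).getD 0)
    let m := (PySem.List.max? ds (fun x => x)).getD 0
    (PySem.List.enumerate ds 0).foldl
      (fun sc p =>
        PySem.List.pySetD sc p.1
          (PySem.List.pyGetD sc p.1 0 + (if p.2 = m then 1 else 0))) scores) scores0
  (PySem.List.max? scores (fun x => x)).getD 0

-- ===== PORT B =====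
def compute_max_score_2_alt (distances : List (List Int)) (total_time : Int) : Int :=
  (PySem.List.max?
    (distances.map (fun d =>
      (PySem.List.pyRange 0 total_time 1).foldl
        (fun acc t =>
          acc + (if distances.all (fun other =>
                      (PySem.List.pyGet? other t).getD 0 ≤ (PySem.List.pyGet? d t).getD 0)
                 then 1 else 0)) 0))
    (fun x => x)).getD 0

-- ===== PRECONDITION & SPEC =====
-- Pre_ excludes exactly the inputs where Python A raises: empty distances (max of
-- an empty list, ValueError) and seconds beyond some reindeer's list (IndexError).
def Pre_compute_max_score_2 (distances : List (List Int)) (total_time : Int) : Prop :=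
  distances ≠ [] ∧ ∀ d ∈ distances, total_time ≤ (d.length : Int)
instance (distances : List (List Int)) (total_time : Int) : Decidable (Pre_compute_max_score_2 distances total_time) := by unfold Pre_compute_max_score_2; infer_instance
def pvWitness_compute_max_score_2 : List (List Int) × Int := ([[1, 2], [2, 1]], 2)

def Spec_compute_max_score_2 (distances : List (List Int)) (total_time : Int) (out : Int) : Prop := out = compute_max_score_2_alt distances total_time
instance (distances : List (List Int)) (total_time : Int) (out : Int) : Decidable (Spec_compute_max_score_2 distances total_time out) := by unfold Spec_compute_max_score_2; infer_instance

-- ===== CLAIM (what is proved, stated in full; the proofs are below) =====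
def Claim_equal_compute_max_score_2 : Prop := ∀ (distances : List (List Int)) (total_time : Int), Dom_compute_max_score_2 distances total_time → Pre_compute_max_score_2 distances total_time → Spec_compute_max_score_2 distances total_time (compute_max_score_2 distances total_time)

-- ===== LEMMAS AND PROOFS =====

-- A's inner loop (enumerate + in-place update) is zipWith on the scores list.
theorem inner_loop_eq (g : Int → Int) :
    ∀ (ds pre suf : List Int), suf.length = ds.length →
    (PySem.List.enumerate ds (pre.length : Int)).foldl
      (fun sc p => PySem.List.pySetD sc p.1 (PySem.List.pyGetD sc p.1 0 + g p.2)) (pre ++ suf)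
      = pre ++ List.zipWith (fun s x => s + g x) suf ds := by
  intro ds
  induction ds with
  | nil =>
    intro pre suf h
    have : suf = [] := List.eq_nil_of_length_eq_zero h
    simp [this, PySem.List.enumerate_nil]
  | cons x ds ih =>
    intro pre suf h
    cases suf with
    | nil => simp at h
    | cons s rest =>
      rw [PySem.List.enumerate_cons]
      simp only [List.foldl_cons]
      have hget : PySem.List.pyGetD (pre ++ s :: rest) (pre.length : Int) 0 = s := by
        simp [PySem.List.pyGetD]
      have hset : PySem.List.pySetD (pre ++ s :: rest) (pre.length : Int) (s + g x)
          = (pre ++ [s + g x]) ++ rest := by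
        simp [PySem.List.pySetD_natCast, List.set_append_right]
      rw [hget, hset]
      have hlen : ((pre.length : Int) + 1) = (((pre ++ [s + g x]).length : Nat) : Int) := by
        simp
      rw [hlen, ih (pre ++ [s + g x]) rest (by simpa using h)]
      simp

theorem inner_loop_eq_zero (g : Int → Int) (ds suf : List Int) (h : suf.length = ds.length) :
    (PySem.List.enumerate ds 0).foldl
      (fun sc p => PySem.List.pySetD sc p.1 (PySem.List.pyGetD sc p.1 0 + g p.2)) suf
      = List.zipWith (fun s x => s + g x) suf ds := by
  have := inner_loop_eq g ds [] suf h
  simpa using this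

theorem zipWith_self_of_len :
    ∀ (a : List Int) (b : List (List Int)), a.length = b.length →
    List.zipWith (fun (s : Int) (_ : List Int) => s) a b = a := by
  intro a
  induction a with
  | nil => intro b _; simp
  | cons x xs ih =>
    intro b h
    cases b with
    | nil => simp at h
    | cons y ys => simp [ih ys (by simpa using h)]

theorem zipWith_zipWith_right {α β : Type} (f g : α → β → α) :
    ∀ (a : List α) (b : List β),
    List.zipWith f (List.zipWith g a b) b = List.zipWith (fun s d => f (g s d) d) a b := by
  intro a
  induction a with
  | nil => intro b; simp
  | cons x xs ih =>
    intro b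
    cases b with
    | nil => simp
    | cons y ys => simp [ih ys]

theorem zipWith_replicate_zero (f : Int → List Int → Int) :
    ∀ (b : List (List Int)),
    List.zipWith f (List.replicate b.length 0) b = b.map (fun d => f 0 d) := by
  intro b
  induction b with
  | nil => simp
  | cons y ys ih => simp [List.replicate_succ, ih]

theorem foldl_add_eq_sum (f : Int → Int) (ts : List Int) (init : Int) :
    ts.foldl (fun acc t => acc + f t) init = init + (ts.map f).sum := by
  induction ts generalizing init with
  | nil => simp
  | cons t ts ih => simp [ih, add_assoc]

-- A's whole scoring loop equals, for any per-second leader function L, the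
-- per-reindeer leader-second sums zipped onto the initial scores.
theorem a_fold_eq (distances : List (List Int)) (L : Int → Int) :
    ∀ (ts : List Int) (sc : List Int), sc.length = distances.length →
    ts.foldl (fun sc t =>
        (PySem.List.enumerate (distances.map (fun d => (PySem.List.pyGet? d t).getD 0)) 0).foldl
          (fun sc p => PySem.List.pySetD sc p.1
            (PySem.List.pyGetD sc p.1 0 + (if p.2 = L t then 1 else 0))) sc) sc
      = List.zipWith (fun s d => s +
          (ts.map (fun t => if (PySem.List.pyGet? d t).getD 0 = L t then (1 : Int) else 0)).sum)
          sc distances := by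
  intro ts
  induction ts with
  | nil =>
    intro sc h
    simp only [List.foldl_nil, List.map_nil, List.sum_nil, add_zero]
    exact (zipWith_self_of_len sc distances h).symm
  | cons t ts ih =>
    intro sc h
    simp only [List.foldl_cons]
    rw [inner_loop_eq_zero (fun x => if x = L t then 1 else 0)
        (distances.map (fun d => (PySem.List.pyGet? d t).getD 0)) sc (by simpa using h)]
    rw [List.zipWith_map_right]
    rw [ih _ (by simp [h])]
    rw [zipWith_zipWith_right]
    simp [add_assoc]

-- For a member of a list, 'equals the (first) maximum' is the same as 'is >= everything'.
theorem eq_max_iff_isMax (l : List Int) (v : Int) (hv : v ∈ l) :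
    (v = (PySem.List.max? l (fun x => x)).getD 0) ↔ (∀ x ∈ l, x ≤ v) := by
  obtain ⟨m, hm⟩ : ∃ m, PySem.List.max? l (fun x => x) = some m := by
    cases h : PySem.List.max? l (fun x => x) with
    | none =>
        rw [PySem.List.max?_eq_none_iff] at h
        subst h; simp at hv
    | some m => exact ⟨m, rfl⟩
  rw [hm]
  simp only [Option.getD_some]
  constructor
  · rintro rfl x hx
    exact PySem.List.max?_isMax hm x hx
  · intro hall
    exact le_antisymm (PySem.List.max?_isMax hm v hv) (hall m (PySem.List.max?_mem hm))

-- Per reindeer and per second, A's 'equals the column maximum' test agrees with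
-- B's 'undominated' test.
theorem indicator_eq (distances : List (List Int)) (d : List Int) (hd : d ∈ distances) (t : Int) :
    (if (PySem.List.pyGet? d t).getD 0 =
        (PySem.List.max? (distances.map (fun e => (PySem.List.pyGet? e t).getD 0)) (fun x => x)).getD 0
     then (1 : Int) else 0)
    = (if distances.all (fun other =>
          (PySem.List.pyGet? other t).getD 0 ≤ (PySem.List.pyGet? d t).getD 0)
       then (1 : Int) else 0) := by
  have hv : (PySem.List.pyGet? d t).getD 0 ∈ distances.map (fun e => (PySem.List.pyGet? e t).getD 0) :=
    List.mem_map_of_mem hd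
  have h := eq_max_iff_isMax (distances.map (fun e => (PySem.List.pyGet? e t).getD 0))
    ((PySem.List.pyGet? d t).getD 0) hv
  simp only [List.mem_map, forall_exists_index, and_imp] at h
  by_cases hb : distances.all (fun other =>
      (PySem.List.pyGet? other t).getD 0 ≤ (PySem.List.pyGet? d t).getD 0)
  · simp only [List.all_eq_true, decide_eq_true_eq] at hb
    rw [if_pos (h.mpr (by rintro x e he rfl; exact hb e he)), if_pos (by
      simp only [List.all_eq_true, decide_eq_true_eq]; exact hb)]
  · simp only [List.all_eq_true, decide_eq_true_eq, not_forall] at hb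
    rw [if_neg, if_neg (by simp only [List.all_eq_true, decide_eq_true_eq, not_forall]; exact hb)]
    intro heq
    obtain ⟨e, he, hlt⟩ := hb
    exact hlt (h.mp heq _ e he rfl)

-- The two ports compute the same value (the total Lean forms agree on all inputs).
theorem scores_eq (distances : List (List Int)) (total_time : Int) :
    compute_max_score_2 distances total_time = compute_max_score_2_alt distances total_time := by
  simp only [compute_max_score_2, compute_max_score_2_alt]
  set ts := PySem.List.pyRange 0 total_time 1 with hts
  set L : Int → Int := fun t =>
    (PySem.List.max? (distances.map (fun e => (PySem.List.pyGet? e t).getD 0)) (fun x => x)).getD 0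
    with hL
  rw [a_fold_eq distances L ts (List.replicate distances.length 0) (by simp)]
  rw [zipWith_replicate_zero]
  congr 2
  apply List.map_congr_left
  intro d hd
  rw [zero_add]
  rw [foldl_add_eq_sum (fun t => if distances.all (fun other =>
      (PySem.List.pyGet? other t).getD 0 ≤ (PySem.List.pyGet? d t).getD 0) then (1 : Int) else 0)]
  rw [zero_add]
  congr 1

  apply List.map_congr_left
  intro t _
  exact indicator_eq distances d hd t

-- ===== VERDICT (by name: the statement is the Claim_ definition above) =====
theorem compute_max_score_2_spec : Claim_equal_compute_max_score_2 := by
  intro distances total_time _ _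
  unfold Spec_compute_max_score_2
  exact scores_eq distances total_time
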